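-- pv_equiv track=rewrite | github.com/Emillock/wordle567-solver | solver.py | compute_max_letter_counts
-- ===== SOURCE A (Python) =====
-- from typing import List, Dict, Tuple, Optional
-- from collections import Counter, defaultdict
--
-- def compute_max_letter_counts(words: List[str], letters_number: int) -> Dict[str, int]:
--     """Compute the maximum number of occurrences of each letter across the word list."""
--     max_counts = defaultdict(int)
--     for w in words:
--         w = w.strip()
--         if len(w) != letters_number:
--             continue
--         counts = Counter(w)
--         for letter, c in counts.items():
--             max_counts[letter] = max(max_counts[letter], c)
--     return dict(max_counts)
-- ===== SOURCE B (Python) =====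
-- def compute_max_letter_counts(words, letters_number):
--     """Compute the maximum number of occurrences of each letter across the word list."""
--     filtered = [s for s in map(str.strip, words) if len(s) == letters_number]
--     letters = dict.fromkeys(ch for w in filtered for ch in w)
--     return {ch: max((w.count(ch) for w in filtered), default=0) for ch in letters}
-- ===== Notes on version B (the rewrite author's own statement) =====
-- stated objective: idiomatic
-- what changed: Replaces A's defaultdict accumulator with its per-word inner max-update loop by a declarative pipeline: filter/strip the words once, dedup the letters of the filtered words, and build the result as one dict comprehension taking the max per-word count for each letter.
import Mathlib
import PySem

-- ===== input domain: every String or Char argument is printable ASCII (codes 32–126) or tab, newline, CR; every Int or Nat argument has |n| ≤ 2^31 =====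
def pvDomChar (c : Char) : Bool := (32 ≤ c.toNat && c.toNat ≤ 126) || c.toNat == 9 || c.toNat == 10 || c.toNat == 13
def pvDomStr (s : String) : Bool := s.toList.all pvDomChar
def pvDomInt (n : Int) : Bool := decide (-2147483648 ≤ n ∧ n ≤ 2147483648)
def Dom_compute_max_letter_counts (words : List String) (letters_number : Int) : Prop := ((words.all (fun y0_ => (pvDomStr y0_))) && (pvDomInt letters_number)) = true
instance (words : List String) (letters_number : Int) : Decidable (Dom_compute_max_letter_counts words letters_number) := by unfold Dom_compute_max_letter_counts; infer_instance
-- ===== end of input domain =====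

-- B replaces A's defaultdict accumulator with a per-letter comprehension (filter once, dedup the letters,
-- then max of per-word counts for each letter); objective: idiomatic, no speed claim.
-- Python dict keys are one-character strings; both ports work with Char and wrap to String on return.

-- ===== PORT A =====
def compute_max_letter_counts (words : List String) (letters_number : Int) : List (String × Int) :=
  (words.foldl (fun (max_counts : PySem.Dict Char Int) w =>
      let w' := PySem.Str.strip w
      if PySem.Str.len w' ≠ letters_number then max_counts
      else (PySem.Dict.counter w'.toList).items.foldl
             (fun d p => d.insert p.1 (max (d.getD p.1 0) p.2)) max_counts)
    PySem.Dict.empty).items.map (fun p => (String.ofList [p.1], p.2))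

-- ===== PORT B =====
def compute_max_letter_counts_alt (words : List String) (letters_number : Int) : List (String × Int) :=
  let filtered := (words.map PySem.Str.strip).filter (fun s => PySem.Str.len s == letters_number)
  let letters := PySem.List.dedup (filtered.flatMap String.toList)
  letters.map (fun ch =>
    (String.ofList [ch], PySem.List.maxD (filtered.map (fun w => (w.toList.count ch : Int))) (fun x => x) 0))

-- ===== PRECONDITION & SPEC =====
def Spec_compute_max_letter_counts (words : List String) (letters_number : Int) (out : List (String × Int)) : Prop := out = compute_max_letter_counts_alt words letters_number
instance (words : List String) (letters_number : Int) (out : List (String × Int)) : Decidable (Spec_compute_max_letter_counts words letters_number out) := by unfold Spec_compute_max_letter_counts; infer_instance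

-- ===== CLAIM (what is proved, stated in full; the proofs are below) =====
def Claim_equal_compute_max_letter_counts : Prop := ∀ (words : List String) (letters_number : Int), Dom_compute_max_letter_counts words letters_number → Spec_compute_max_letter_counts words letters_number (compute_max_letter_counts words letters_number)

-- ===== LEMMAS AND PROOFS =====

-- A's per-word inner loop, as a function (identical term to the one in the port).
def stepA (d : PySem.Dict Char Int) (s : String) : PySem.Dict Char Int :=
  (PySem.Dict.counter s.toList).items.foldl
    (fun d p => d.insert p.1 (max (d.getD p.1 0) p.2)) d

-- update with a deduplicated list is update with the list itself
lemma set_update_ofList {α : Type} [BEq α] [LawfulBEq α] (s : PySem.Set α) (xs : List α) :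
    PySem.Set.update s (PySem.Set.ofList xs) = PySem.Set.update s xs := by
  rw [PySem.Set.update_eq_append_filter, PySem.Set.update_eq_append_filter,
      PySem.Set.ofList_ofList]

lemma inner_getD (ks : List Char) (hk : ks.Nodup) (v : Char → Int)
    (d : PySem.Dict Char Int) (c : Char) :
    (ks.foldl (fun d k => d.insert k (max (d.getD k 0) (v k))) d).getD c 0
      = if c ∈ ks then max (d.getD c 0) (v c) else d.getD c 0 := by
  induction ks generalizing d with
  | nil => simp
  | cons k ks ih =>
    simp only [List.foldl_cons]
    rcases List.nodup_cons.mp hk with ⟨hknot, hnd⟩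
    rw [ih hnd]
    by_cases hc : c = k
    · subst hc
      simp [hknot, PySem.Dict.getD_insert_self]
    · rw [PySem.Dict.getD_insert_of_ne _ _ _ hc]
      simp [hc, List.mem_cons]

lemma stepA_getD (s : String) (d : PySem.Dict Char Int) (c : Char) :
    (stepA d s).getD c 0
      = if c ∈ s.toList then max (d.getD c 0) ((s.toList.count c : Int)) else d.getD c 0 := by
  unfold stepA
  rw [PySem.Dict.items_counter, List.foldl_map]
  rw [inner_getD _ (PySem.Set.nodup_ofList s.toList) (fun k => (s.toList.count k : Int)) d c]
  simp [PySem.Set.mem_ofList]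

lemma stepA_keys (s : String) (d : PySem.Dict Char Int) :
    (stepA d s).keys = PySem.Set.update d.keys s.toList := by
  unfold stepA
  rw [PySem.Dict.items_counter, List.foldl_map]
  rw [PySem.Dict.keys_foldl_insert_key _ (fun k => k)
        (fun d k => max (d.getD k 0) ((s.toList.count k : Int)))]
  rw [List.map_id', set_update_ofList]

lemma stepA_nonneg (s : String) (d : PySem.Dict Char Int)
    (hd : ∀ c, 0 ≤ d.getD c 0) (c : Char) : 0 ≤ (stepA d s).getD c 0 := by
  rw [stepA_getD]
  split_ifs
  · exact le_max_of_le_left (hd c)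
  · exact hd c

lemma outer_fold (fs : List String) (d : PySem.Dict Char Int)
    (hd : ∀ c, 0 ≤ d.getD c 0) :
    (fs.foldl stepA d).keys = PySem.Set.update d.keys (fs.flatMap String.toList)
    ∧ ∀ c, (fs.foldl stepA d).getD c 0
        = (fs.map (fun s => (s.toList.count c : Int))).foldl max (d.getD c 0) := by
  induction fs generalizing d with
  | nil => simp [PySem.Set.update_nil]
  | cons s fs ih =>
    simp only [List.foldl_cons, List.flatMap_cons, List.map_cons]
    obtain ⟨ihk, ihg⟩ := ih (stepA d s) (stepA_nonneg s d hd)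
    constructor
    · rw [ihk, stepA_keys, PySem.Set.update_append]
    · intro c
      rw [ihg c, stepA_getD]
      by_cases hc : c ∈ s.toList
      · rw [if_pos hc]
      · rw [if_neg hc, List.count_eq_zero.mpr hc]
        simp [max_eq_left (hd c)]

lemma maxD_id_nonneg (x0 : Int) (t : List Int) (hx0 : 0 ≤ x0) :
    PySem.List.maxD (x0 :: t) (fun y => y) 0 = (x0 :: t).foldl max 0 := by
  simp only [PySem.List.maxD, PySem.List.max?_id_cons, Option.getD_some, List.foldl_cons]
  rw [max_eq_right hx0]

theorem compute_max_letter_counts_spec_aux (words : List String) (letters_number : Int) :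
    compute_max_letter_counts words letters_number
      = compute_max_letter_counts_alt words letters_number := by
  simp only [compute_max_letter_counts, compute_max_letter_counts_alt]
  -- A's outer loop = a fold of stepA over the filtered stripped words
  have h1 : ∀ (l : List String) (d : PySem.Dict Char Int),
      l.foldl (fun max_counts w =>
        let w' := PySem.Str.strip w
        if PySem.Str.len w' ≠ letters_number then max_counts
        else (PySem.Dict.counter w'.toList).items.foldl
               (fun d p => d.insert p.1 (max (d.getD p.1 0) p.2)) max_counts) d
      = ((l.map PySem.Str.strip).filter
          (fun s => PySem.Str.len s == letters_number)).foldl stepA d := by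
    intro l d
    induction l generalizing d with
    | nil => rfl
    | cons w l ih =>
      simp only [List.foldl_cons, List.map_cons, List.filter_cons]
      by_cases h : PySem.Str.len (PySem.Str.strip w) = letters_number
      · simp only [ne_eq, h, not_true_eq_false, if_false, beq_self_eq_true, if_true,
          List.foldl_cons]
        exact ih _
      · simp only [ne_eq, h, not_false_eq_true, if_true, beq_iff_eq]
        exact ih _
  rw [h1 words PySem.Dict.empty]
  obtain ⟨hk, hg⟩ := outer_fold
    ((words.map PySem.Str.strip).filter (fun s => PySem.Str.len s == letters_number))
    PySem.Dict.empty (fun c => by rw [PySem.Dict.getD_empty])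
  have hkeys : (((words.map PySem.Str.strip).filter
      (fun s => PySem.Str.len s == letters_number)).foldl stepA PySem.Dict.empty).keys
      = PySem.Set.ofList (((words.map PySem.Str.strip).filter
          (fun s => PySem.Str.len s == letters_number)).flatMap String.toList) := by
    rw [hk, PySem.Dict.keys_empty, PySem.Set.update_nil_left]
  have hnd : (((words.map PySem.Str.strip).filter
      (fun s => PySem.Str.len s == letters_number)).foldl stepA PySem.Dict.empty).keys.Nodup := by
    rw [hkeys]; exact PySem.Set.nodup_ofList _
  rw [PySem.Dict.items_eq_map_keys _ hnd 0, hkeys, List.map_map, PySem.List.dedup_eq_ofList]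
  apply List.map_congr_left
  intro c hc
  have hmem : c ∈ ((words.map PySem.Str.strip).filter
      (fun s => PySem.Str.len s == letters_number)).flatMap String.toList :=
    (PySem.Set.mem_ofList _ _).mp hc
  simp only [Function.comp_apply]
  refine Prod.ext rfl ?_
  rw [hg c, PySem.Dict.getD_empty]
  cases hfs : (words.map PySem.Str.strip).filter (fun s => PySem.Str.len s == letters_number) with
  | nil => rw [hfs] at hmem; simp at hmem
  | cons f rest =>
    rw [hfs] at *
    rw [List.map_cons, maxD_id_nonneg _ _ (Int.natCast_nonneg _)]

-- ===== VERDICT (by name: the statement is the Claim_ definition above) =====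
theorem compute_max_letter_counts_spec : Claim_equal_compute_max_letter_counts := by
  intro words letters_number _
  show _ = _
  exact compute_max_letter_counts_spec_aux words letters_number
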